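-- pv_equiv track=rewrite | github.com/aerovfx/Fullstack4kid | APPENDIX_A/Python/PythonStudy/Baochau/de44/DAYFIBO_V2.PY | day_fibonaci
-- ===== SOURCE A (Python) =====
-- def day_fibonaci(n):
--     if len(n) < 3:
--         return False
--     if n[:2] != '01':
--         return False
--
--
--     a, b = 0, 1
--     i = 2
--     while i<len(n):
--         tong = a + b
--         if n[i:i + len(str(tong))] != str(tong):
--             return False
--         a, b = b, tong
--         i += len(str(tong))
--     return True
-- ===== SOURCE B (Python) =====
-- def day_fibonaci(n):
--     if len(n) < 3:
--         return False
--     s = '01'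
--     a, b = 0, 1
--     while len(s) < len(n):
--         c = a + b
--         s += str(c)
--         a, b = b, c
--     return n == s
-- ===== Notes on version B (the rewrite author's own statement) =====
-- stated objective: simpler
-- what changed: B generates the full expected canonical Fibonacci concatenation up to the input's length and does one whole-string equality, instead of A's indexed slice-by-slice verification with prefix check and early exits.
import Mathlib
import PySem

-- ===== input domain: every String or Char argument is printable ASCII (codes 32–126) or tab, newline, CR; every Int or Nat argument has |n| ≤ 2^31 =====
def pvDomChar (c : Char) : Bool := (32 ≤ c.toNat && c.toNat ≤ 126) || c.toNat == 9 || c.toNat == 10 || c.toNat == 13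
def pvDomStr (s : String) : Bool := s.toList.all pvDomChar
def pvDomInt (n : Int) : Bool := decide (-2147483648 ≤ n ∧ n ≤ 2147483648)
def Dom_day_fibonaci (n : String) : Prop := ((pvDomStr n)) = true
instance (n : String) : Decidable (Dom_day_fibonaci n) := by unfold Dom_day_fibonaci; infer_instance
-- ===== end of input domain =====

-- B builds the full expected canonical Fibonacci concatenation and does one whole-string equality,
-- instead of A's slice-by-slice verification with early exit (objective: simpler).

-- str(m) is never empty (needed by both loops' termination)
theorem pvToCharsLenPos (m : Int) : 0 < (PySem.Int.toChars m).length := by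
  unfold PySem.Int.toChars
  split
  · simp
  · exact Nat.length_toDigits_pos

-- ===== PORT A =====
-- A's while loop: checks the chunk n[i:i+len(str(tong))] against str(tong), advancing i.
def dayFibLoopA (n : List Char) (a b : Int) (i : Int) : Bool :=
  if _h : i < (n.length : Int) then
    let tong := a + b
    let ts := PySem.Int.toChars tong
    if PySem.List.slice n (some i) (some (i + (ts.length : Int))) ≠ ts then false
    else dayFibLoopA n b tong (i + (ts.length : Int))
  else true
termination_by ((n.length : Int) - i).toNat
decreasing_by
  have := pvToCharsLenPos (a + b)
  omega

def day_fibonaci (n : String) : Bool :=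
  if n.toList.length < 3 then false
  else if PySem.List.slice n.toList none (some 2) ≠ ['0', '1'] then false
  else dayFibLoopA n.toList 0 1 2

-- ===== PORT B =====
-- B's while loop: appends str(c) to s until len(s) >= len(n).
def dayFibLoopB (n : List Char) (s : List Char) (a b : Int) : List Char :=
  if _h : s.length < n.length then
    let c := a + b
    dayFibLoopB n (s ++ PySem.Int.toChars c) b c
  else s
termination_by n.length - s.length
decreasing_by
  have := pvToCharsLenPos (a + b)
  simp only [List.length_append]
  omega

def day_fibonaci_alt (n : String) : Bool :=
  if n.toList.length < 3 then false
  else decide (n.toList = dayFibLoopB n.toList ['0', '1'] 0 1)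

-- ===== PRECONDITION & SPEC =====
def Spec_day_fibonaci (n : String) (out : Bool) : Prop := out = day_fibonaci_alt n
instance (n : String) (out : Bool) : Decidable (Spec_day_fibonaci n out) := by unfold Spec_day_fibonaci; infer_instance

-- ===== CLAIM (what is proved, stated in full; the proofs are below) =====
def Claim_equal_day_fibonaci : Prop := ∀ (n : String), Dom_day_fibonaci n → Spec_day_fibonaci n (day_fibonaci n)

-- ===== LEMMAS AND PROOFS =====

-- the Fibonacci-string tail of length-budget m, starting from state (a, b)
def fibTail (a b : Int) (m : Nat) : List Char :=
  if _h : 0 < m then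
    let c := a + b
    PySem.Int.toChars c ++ fibTail b c (m - (PySem.Int.toChars c).length)
  else []
termination_by m
decreasing_by
  have := pvToCharsLenPos (a + b)
  omega

-- splitting off a verified prefix
theorem pvSplitIff (M P X : List Char) (h : M.take P.length = P) :
    (M = P ++ X) ↔ (M.drop P.length = X) := by
  constructor
  · intro he
    rw [he, List.drop_left]
  · intro he
    conv_lhs => rw [← List.take_append_drop P.length M]
    rw [h, he]

theorem dayFibLoopB_eq (n s : List Char) (a b : Int) :
    dayFibLoopB n s a b = s ++ fibTail a b (n.length - s.length) := by
  rw [dayFibLoopB]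
  by_cases h : s.length < n.length
  · have hL := pvToCharsLenPos (a + b)
    simp only [dif_pos h]
    rw [dayFibLoopB_eq n (s ++ PySem.Int.toChars (a + b)) b (a + b)]
    conv_rhs => rw [fibTail]
    simp only [dif_pos (by omega : 0 < n.length - s.length)]
    simp only [List.length_append, List.append_assoc]
    congr 2
    congr 1
    omega
  · simp only [dif_neg h]
    rw [fibTail]
    simp only [dif_neg (by omega : ¬ 0 < n.length - s.length), List.append_nil]
termination_by n.length - s.length
decreasing_by
  have := pvToCharsLenPos (a + b)
  simp only [List.length_append]
  omega

theorem dayFibLoopA_eq (n : List Char) (j : Nat) (a b : Int) :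
    dayFibLoopA n a b (j : Int) = decide (n.drop j = fibTail a b (n.length - j)) := by
  by_cases hj : j < n.length
  · have hL := pvToCharsLenPos (a + b)
    rw [dayFibLoopA]
    simp only [dif_pos (by exact_mod_cast hj : (j : Int) < (n.length : Int))]
    have hslice : PySem.List.slice n (some (j : Int))
        (some ((j : Int) + ((PySem.Int.toChars (a + b)).length : Int)))
        = (n.drop j).take (PySem.Int.toChars (a + b)).length :=
      PySem.List.slice_natCast_add n j (PySem.Int.toChars (a + b)).length
    rw [fibTail]
    simp only [dif_pos (by omega : 0 < n.length - j)]
    set ts := PySem.Int.toChars (a + b) with hts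
    by_cases hc : (n.drop j).take ts.length = ts
    · simp only [hslice, hc, ne_eq, not_true_eq_false, if_false]
      have hcast : (j : Int) + (ts.length : Int) = ((j + ts.length : Nat) : Int) := by
        push_cast; ring
      rw [hcast, dayFibLoopA_eq n (j + ts.length) b (a + b)]
      rw [show n.length - j - ts.length = n.length - (j + ts.length) from by omega]
      refine decide_eq_decide.mpr ?_
      have hdd : (n.drop j).drop ts.length = n.drop (j + ts.length) := by
        rw [List.drop_drop]
      rw [← hdd]
      exact (pvSplitIff (n.drop j) ts _ hc).symm
    · simp only [hslice, ne_eq, hc, not_false_eq_true, if_true]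
      symm
      simp only [decide_eq_false_iff_not]
      intro heq
      apply hc
      rw [heq]
      exact List.take_left' rfl
  · rw [dayFibLoopA]
    simp only [dif_neg (by exact_mod_cast hj : ¬ ((j : Int) < (n.length : Int)))]
    rw [fibTail]
    simp only [dif_neg (by omega : ¬ 0 < n.length - j)]
    rw [List.drop_of_length_le (by omega)]
    simp
termination_by n.length - j
decreasing_by
  have := pvToCharsLenPos (a + b)
  omega

-- ===== VERDICT (by name: the statement is the Claim_ definition above) =====
theorem day_fibonaci_spec : Claim_equal_day_fibonaci := by
  intro n _
  unfold Spec_day_fibonaci day_fibonaci day_fibonaci_alt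
  set L := n.toList with hLdef
  by_cases h3 : L.length < 3
  · simp [h3]
  · simp only [if_neg h3]
    rw [dayFibLoopB_eq]
    have hpl : (['0', '1'] : List Char).length = 2 := rfl
    rw [hpl]
    have h2 : PySem.List.slice L none (some 2) = L.take 2 := by
      have := PySem.List.slice_to_natCast L 2
      simpa using this
    by_cases hpre : L.take 2 = ['0', '1']
    · simp only [h2, hpre, ne_eq, not_true_eq_false, if_false]
      rw [show (2 : Int) = ((2 : Nat) : Int) from rfl, dayFibLoopA_eq L 2 0 1]
      refine decide_eq_decide.mpr ?_
      exact (pvSplitIff L ['0', '1'] _ (by exact hpre)).symm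
    · simp only [h2, ne_eq, hpre, not_false_eq_true, if_true]
      symm
      simp only [decide_eq_false_iff_not]
      intro heq
      apply hpre
      rw [heq]
      exact List.take_left' rfl
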